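-- pv_equiv track=rewrite | github.com/HuyaneMatsu/hata | hata/ext/commands/command.py | normalize_description
-- ===== SOURCE A (Python) =====
-- def normalize_description(text):
--     """
--     Normalizes a passed string with right stripping every line, with removing every empty line from it's start and
--     from it's end, and with dedenting.
--
--     Parameters
--     ----------
--     text : `str`
--         Docstring to normalize.
--
--     Returns
--     -------
--     result : `None` or `str`
--         The normalized description, or `None` if ended up with an empty string.
--     """
--     lines = text.splitlines()
--
--     for index in range(len(lines)):
--         lines[index] = lines[index].rstrip()
--
--     while True:
--         if not lines:
--             return None
--
--         if lines[-1]: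
--             break
--
--         del lines[-1]
--         continue
--
--     while True:
--         if lines[0]:
--             break
--
--         del lines[0]
--         continue
--
--     limit = len(lines)
--     if limit == 1:
--         return lines[0].lstrip()
--
--     ignore_index = 0
--
--     while True:
--         next_char = lines[0][ignore_index]
--         if next_char not in ('\t', ' '):
--             break
--
--         index=1
--         while index < limit:
--             line = lines[index]
--             index = index+1
--             if not line:
--                 continue
--
--             char = line[ignore_index]
--             if char != next_char:
--                 break
--
--             continue
--
--         if char != next_char:
--             break
--
--         ignore_index +=1
--         continue
--
--     if ignore_index:
--         for index in range(len(lines)):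
--             line = lines[index]
--             if not line:
--                 continue
--
--             lines[index] = line[ignore_index:]
--             continue
--
--     return '\n'.join(lines)
-- ===== SOURCE B (Python) =====
-- def _common_prefix(a, b):
--     if a and b and a[0] == b[0]:
--         return a[0] + _common_prefix(a[1:], b[1:])
--     return ''
--
--
-- def _indent_width(prefix):
--     width = 0
--     for char in prefix:
--         if char not in ('\t', ' '):
--             break
--         width += 1
--     return width
--
--
-- def normalize_description(text):
--     lines = [line.rstrip() for line in text.splitlines()]
--     while lines and not lines[-1]:
--         lines.pop()
--     if not lines:
--         return None
--     while not lines[0]: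
--         del lines[0]
--     if len(lines) == 1:
--         return lines[0].lstrip()
--     prefix = None
--     for line in lines:
--         if line:
--             prefix = line if prefix is None else _common_prefix(prefix, line)
--     width = _indent_width(prefix)
--     return '\n'.join(line[width:] for line in lines)
-- ===== Notes on version B (the rewrite author's own statement) =====
-- stated objective: alternative
-- what changed: The dedent count is computed by folding a longest-common-prefix over the non-empty lines and taking the length of its leading whitespace run, instead of A's nested per-column scan over all lines with break/continue state.
import Mathlib
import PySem

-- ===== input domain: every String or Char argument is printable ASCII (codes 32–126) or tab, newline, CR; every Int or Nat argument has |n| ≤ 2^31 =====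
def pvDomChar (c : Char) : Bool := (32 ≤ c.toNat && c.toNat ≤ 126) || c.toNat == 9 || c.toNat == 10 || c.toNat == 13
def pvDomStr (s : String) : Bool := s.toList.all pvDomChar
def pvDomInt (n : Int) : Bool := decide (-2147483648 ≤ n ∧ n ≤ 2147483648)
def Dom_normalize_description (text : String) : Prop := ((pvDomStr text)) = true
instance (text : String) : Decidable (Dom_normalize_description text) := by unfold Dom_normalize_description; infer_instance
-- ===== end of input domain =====

-- B replaces A's per-column dedent scan by folding a longest-common-prefix over the non-empty
-- lines and taking its leading whitespace run (objective: alternative; same return value).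

def pvIsWs (c : Char) : Bool := c == '\t' || c == ' '

-- ===== PORT A =====
-- `while True: if not lines: return None; if lines[-1]: break; del lines[-1]` (run on the reversed list)
def pvTrimEndA : List (List Char) → Option (List (List Char))
  | [] => none
  | l :: tl => if l.isEmpty then pvTrimEndA tl else some (l :: tl)

-- `while True: if lines[0]: break; del lines[0]` ([] is unreachable in A: the trimmed list's last line is non-empty)
def pvTrimStartA : List (List Char) → List (List Char)
  | [] => []
  | l :: tl => if l.isEmpty then pvTrimStartA tl else l :: tl

-- inner `while index < limit` over lines[1:], returning the last value bound to `char`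
-- (`none` = `char` unset / IndexError — both unreachable in A, since every line is rstripped)
def pvInnerA (nc : Char) (k : Nat) : List (List Char) → Option Char → Option Char
  | [], ch => ch
  | l :: tl, ch =>
    if l.isEmpty then pvInnerA nc k tl ch
    else
      match PySem.List.pyGet? l (k : Int) with
      | none => none
      | some c => if c = nc then pvInnerA nc k tl (some c) else some c

-- outer `while True` computing ignore_index; fuel first.length + 1 never runs out (proved below)
def pvOuterA (first : List Char) (rest : List (List Char)) : Nat → Nat → Nat
  | 0, k => k
  | fuel+1, k =>
    match PySem.List.pyGet? first (k : Int) with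
    | none => k        -- IndexError in Python; unreachable: first is rstripped and non-empty
    | some nc =>
      if pvIsWs nc then
        match pvInnerA nc k rest none with
        | some c => if c = nc then pvOuterA first rest fuel (k+1) else k
        | none => k
      else k

def normalize_description (text : String) : Option String :=
  let lines := (PySem.Chars.splitlines text.toList).map PySem.Chars.rstrip
  match pvTrimEndA lines.reverse with
  | none => none
  | some r =>
    match pvTrimStartA r.reverse with
    | [] => none          -- unreachable: the trimmed list's last line is non-empty
    | [l] => some (String.ofList (PySem.Chars.lstrip l))
    | first :: rest =>
      let k := pvOuterA first rest (first.length + 1) 0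
      let lines' := if k = 0 then first :: rest
        else (first :: rest).map (fun l => if l.isEmpty then l else PySem.List.slice l (some (k : Int)) none)
      some (String.ofList (PySem.Chars.join ['\n'] lines'))

-- ===== PORT B =====
def pvCommonPrefix : List Char → List Char → List Char
  | a :: as, b :: bs => if a = b then a :: pvCommonPrefix as bs else []
  | _, _ => []

def pvIndentWidth : List Char → Nat
  | [] => 0
  | c :: tl => if pvIsWs c then pvIndentWidth tl + 1 else 0

-- `while lines and not lines[-1]: lines.pop()` (run on the reversed list)
def pvTrimEndB : List (List Char) → List (List Char)
  | [] => []
  | l :: tl => if l.isEmpty then pvTrimEndB tl else l :: tl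

-- `while not lines[0]: del lines[0]` ([] unreachable in B: the last line is non-empty)
def pvTrimStartB : List (List Char) → List (List Char)
  | [] => []
  | l :: tl => if l.isEmpty then pvTrimStartB tl else l :: tl

def pvFoldPrefix (lines : List (List Char)) : Option (List Char) :=
  lines.foldl
    (fun acc l =>
      if l.isEmpty then acc
      else
        match acc with
        | none => some l
        | some p => some (pvCommonPrefix p l)) none

def normalize_description_alt (text : String) : Option String :=
  let lines0 := (PySem.Chars.splitlines text.toList).map PySem.Chars.rstrip
  let lines1 := (pvTrimEndB lines0.reverse).reverse
  if lines1.isEmpty then none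
  else
    let lines := pvTrimStartB lines1
    if lines.length = 1 then some (String.ofList (PySem.Chars.lstrip (lines.headD [])))
    else
      let width := pvIndentWidth ((pvFoldPrefix lines).getD [])
      some (String.ofList (PySem.Chars.join ['\n']
        (lines.map (fun l => PySem.List.slice l (some (width : Int)) none))))

-- ===== PRECONDITION & SPEC =====
def Spec_normalize_description (text : String) (out : Option String) : Prop := out = normalize_description_alt text
instance (text : String) (out : Option String) : Decidable (Spec_normalize_description text out) := by unfold Spec_normalize_description; infer_instance

-- ===== CLAIM (what is proved, stated in full; the proofs are below) =====
def Claim_equal_normalize_description : Prop := ∀ (text : String), Dom_normalize_description text → Spec_normalize_description text (normalize_description text)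

-- ===== LEMMAS AND PROOFS =====

theorem pvTrimEndA_eq (xs : List (List Char)) :
    pvTrimEndA xs = if (pvTrimEndB xs).isEmpty then none else some (pvTrimEndB xs) := by
  induction xs with
  | nil => simp [pvTrimEndA, pvTrimEndB]
  | cons l tl ih =>
    simp only [pvTrimEndA, pvTrimEndB]
    by_cases h : l.isEmpty <;> simp [h, ih]

theorem pvTrimStart_eq (xs : List (List Char)) : pvTrimStartA xs = pvTrimStartB xs := by
  induction xs with
  | nil => rfl
  | cons l tl ih =>
    simp only [pvTrimStartA, pvTrimStartB]
    by_cases h : l.isEmpty <;> simp [h, ih]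

theorem pvTrimEndB_head (xs : List (List Char)) (l : List Char) (tl : List (List Char))
    (h : pvTrimEndB xs = l :: tl) : l ≠ [] := by
  induction xs with
  | nil => simp [pvTrimEndB] at h
  | cons x xtl ih =>
    simp only [pvTrimEndB] at h
    by_cases hx : x.isEmpty
    · simp [hx] at h; exact ih h
    · simp [hx] at h
      intro hl; rw [← h.1] at hl; simp [hl] at hx

theorem pvTrimStartB_getLast? (xs : List (List Char)) (g : List Char)
    (hg : xs.getLast? = some g) (hne : g ≠ []) : (pvTrimStartB xs).getLast? = some g := by
  induction xs with
  | nil => simp at hg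
  | cons x tl ih =>
    simp only [pvTrimStartB]
    by_cases hx : x.isEmpty
    · cases tl with
      | nil =>
        simp at hg
        subst hg
        simp at hx
        exact absurd hx hne
      | cons y ytl =>
        rw [List.getLast?_cons_cons] at hg
        simp only [hx, if_true]
        exact ih hg
    · simp [hx, hg]

theorem pvTrimStartB_head (xs : List (List Char)) (l : List Char) (tl : List (List Char))
    (h : pvTrimStartB xs = l :: tl) : l ≠ [] := by
  induction xs with
  | nil => simp [pvTrimStartB] at h
  | cons x xtl ih =>
    simp only [pvTrimStartB] at h
    by_cases hx : x.isEmpty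
    · simp [hx] at h; exact ih h
    · simp [hx] at h
      intro hl; rw [← h.1] at hl; simp [hl] at hx

theorem pvCommonPrefix_prefix_left (a b : List Char) : pvCommonPrefix a b <+: a := by
  induction a generalizing b with
  | nil => simp [pvCommonPrefix]
  | cons x as ih =>
    cases b with
    | nil => simp [pvCommonPrefix]
    | cons y bs =>
      simp only [pvCommonPrefix]
      by_cases h : x = y
      · simpa [h] using ih bs
      · simp [h]

theorem pvCommonPrefix_prefix_right (a b : List Char) : pvCommonPrefix a b <+: b := by
  induction a generalizing b with
  | nil => simp [pvCommonPrefix]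
  | cons x as ih =>
    cases b with
    | nil => simp [pvCommonPrefix]
    | cons y bs =>
      simp only [pvCommonPrefix]
      by_cases h : x = y
      · subst h; simpa using ih bs
      · simp [h]

theorem pvCommonPrefix_maximal (p a b : List Char) (ha : p <+: a) (hb : p <+: b) :
    p <+: pvCommonPrefix a b := by
  induction p generalizing a b with
  | nil => simp
  | cons x ptl ih =>
    obtain ⟨ta, rfl⟩ := ha
    obtain ⟨tb, hb'⟩ := hb
    cases b with
    | nil => simp at hb'
    | cons y bs =>
      simp at hb'
      obtain ⟨rfl, hbs⟩ := hb'
      simp only [pvCommonPrefix, List.cons_append, if_true]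
      exact List.cons_prefix_cons.mpr ⟨rfl, ih _ _ ⟨ta, rfl⟩ ⟨tb, hbs⟩⟩

-- the fold over the non-empty lines, written with a definite (non-empty) seed
def pvCpFold (p : List Char) (rest : List (List Char)) : List Char :=
  rest.foldl (fun p l => if l.isEmpty then p else pvCommonPrefix p l) p

theorem pvFoldPrefix_some (rest : List (List Char)) (p : List Char) :
    rest.foldl
      (fun acc l =>
        if l.isEmpty then acc
        else
          match acc with
          | none => some l
          | some q => some (pvCommonPrefix q l)) (some p) = some (pvCpFold p rest) := by
  induction rest generalizing p with
  | nil => rfl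
  | cons l tl ih =>
    simp only [pvCpFold, List.foldl_cons]
    by_cases h : l.isEmpty
    · simp only [h, if_true]
      exact ih p
    · simp only [h, if_false, Bool.false_eq_true]
      exact ih (pvCommonPrefix p l)

theorem pvCpFold_prefix_acc (rest : List (List Char)) (p : List Char) : pvCpFold p rest <+: p := by
  induction rest generalizing p with
  | nil => simp [pvCpFold]
  | cons l tl ih =>
    simp only [pvCpFold, List.foldl_cons]
    by_cases h : l.isEmpty
    · simpa [h, pvCpFold] using ih p
    · simp only [h, if_false, Bool.false_eq_true]
      exact (ih (pvCommonPrefix p l)).trans (pvCommonPrefix_prefix_left p l)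

theorem pvCpFold_prefix_mem (rest : List (List Char)) (p l : List Char)
    (hl : l ∈ rest) (hne : l ≠ []) : pvCpFold p rest <+: l := by
  induction rest generalizing p with
  | nil => simp at hl
  | cons x tl ih =>
    simp only [pvCpFold, List.foldl_cons]
    rcases List.mem_cons.mp hl with rfl | hl'
    · have hx : l.isEmpty = false := by simpa using hne
      simp only [hx, if_false, Bool.false_eq_true]
      exact (pvCpFold_prefix_acc tl (pvCommonPrefix p l)).trans (pvCommonPrefix_prefix_right p l)
    · by_cases hx : x.isEmpty
      · simp only [hx, if_true]
        exact ih _ hl'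
      · simp only [hx, if_false, Bool.false_eq_true]
        exact ih _ hl'

theorem pvCpFold_maximal (rest : List (List Char)) (p q : List Char)
    (hp : q <+: p) (hmem : ∀ l ∈ rest, l ≠ [] → q <+: l) : q <+: pvCpFold p rest := by
  induction rest generalizing p with
  | nil => simpa [pvCpFold] using hp
  | cons x tl ih =>
    simp only [pvCpFold, List.foldl_cons]
    by_cases hx : x.isEmpty
    · simp only [hx, if_true]
      exact ih p hp (fun l hl => hmem l (List.mem_cons_of_mem _ hl))
    · simp only [hx, if_false, Bool.false_eq_true]
      refine ih _ (pvCommonPrefix_maximal q p x hp ?_) (fun l hl => hmem l (List.mem_cons_of_mem _ hl))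
      exact hmem x List.mem_cons_self (by simpa using hx)

theorem pvIndentWidth_le (p : List Char) : pvIndentWidth p ≤ p.length := by
  induction p with
  | nil => simp [pvIndentWidth]
  | cons c tl ih =>
    simp only [pvIndentWidth, List.length_cons]
    by_cases h : pvIsWs c <;> simp [h] <;> omega

theorem pvIndentWidth_lt (p : List Char) (j : Nat) (hj : j < pvIndentWidth p) :
    ∃ c, p[j]? = some c ∧ pvIsWs c = true := by
  induction p generalizing j with
  | nil => simp [pvIndentWidth] at hj
  | cons x tl ih =>
    simp only [pvIndentWidth] at hj
    by_cases hx : pvIsWs x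
    · simp only [hx, if_true] at hj
      cases j with
      | zero => exact ⟨x, by simp, hx⟩
      | succ j' =>
        obtain ⟨c, hc, hwc⟩ := ih j' (by omega)
        exact ⟨c, by simpa using hc, hwc⟩
    · simp [hx] at hj

theorem pvIndentWidth_stop (p : List Char) (c : Char)
    (hc : p[pvIndentWidth p]? = some c) : pvIsWs c = false := by
  induction p with
  | nil => simp at hc
  | cons x tl ih =>
    simp only [pvIndentWidth] at hc
    by_cases hx : pvIsWs x
    · simp only [hx, if_true] at hc
      exact ih (by simpa using hc)
    · simp only [hx, if_false, Bool.false_eq_true] at hc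
      simp at hc
      subst hc
      simpa using hx

theorem pvPrefix_get (p l : List Char) (h : p <+: l) (j : Nat) (c : Char)
    (hc : p[j]? = some c) : l[j]? = some c := by
  obtain ⟨t, rfl⟩ := h
  have hj : j < p.length := by
    rcases List.getElem?_eq_some_iff.mp hc with ⟨hlt, _⟩
    exact hlt
  rw [List.getElem?_append_left hj]
  exact hc

theorem pvPrefix_of_agree (n : Nat) (a b : List Char)
    (h : ∀ j < n, ∃ c, a[j]? = some c ∧ b[j]? = some c) : a.take n <+: b := by
  induction n generalizing a b with
  | zero => simp
  | succ n ih =>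
    obtain ⟨c, h0a, h0b⟩ := h 0 (Nat.succ_pos n)
    cases a with
    | nil => simp at h0a
    | cons x as =>
      cases b with
      | nil => simp at h0b
      | cons y bs =>
        simp at h0a h0b
        subst h0a; subst h0b
        simp only [List.take_succ_cons, List.cons_prefix_cons, true_and]
        refine ih as bs (fun j hj => ?_)
        have := h (j+1) (by omega)
        simpa using this

-- column j is uniform whitespace: first and every non-empty later line carry the same ws char
def pvColOk (first : List Char) (rest : List (List Char)) (j : Nat) : Prop :=
  ∃ c, first[j]? = some c ∧ pvIsWs c = true ∧ ∀ l ∈ rest, l ≠ [] → l[j]? = some c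

theorem pvColOk_of_lt (first : List Char) (rest : List (List Char)) (j : Nat)
    (hj : j < pvIndentWidth (pvCpFold first rest)) : pvColOk first rest j := by
  obtain ⟨c, hc, hw⟩ := pvIndentWidth_lt _ j hj
  exact ⟨c, pvPrefix_get _ _ (pvCpFold_prefix_acc rest first) j c hc, hw,
    fun l hl hne => pvPrefix_get _ _ (pvCpFold_prefix_mem rest first l hl hne) j c hc⟩

theorem pvColOk_not (first : List Char) (rest : List (List Char)) :
    ¬ pvColOk first rest (pvIndentWidth (pvCpFold first rest)) := by
  set m := pvIndentWidth (pvCpFold first rest) with hm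
  rintro ⟨c, hc, hw, hall⟩
  have hagree : ∀ j < m + 1, ∃ c', first[j]? = some c' ∧ ∀ l ∈ rest, l ≠ [] → l[j]? = some c' := by
    intro j hj
    by_cases hjm : j < m
    · obtain ⟨c', hc', _, hall'⟩ := pvColOk_of_lt first rest j hjm
      exact ⟨c', hc', hall'⟩
    · have : j = m := by omega
      subst this
      exact ⟨c, hc, hall⟩
  have hq : first.take (m+1) <+: pvCpFold first rest := by
    refine pvCpFold_maximal rest first _ (List.take_prefix _ _) (fun l hl hne => ?_)
    refine pvPrefix_of_agree (m+1) first l (fun j hj => ?_)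
    obtain ⟨c', hc', hall'⟩ := hagree j hj
    exact ⟨c', hc', hall' l hl hne⟩
  have hqm : (first.take (m+1))[m]? = some c := by
    rw [List.getElem?_take_of_lt (Nat.lt_succ_self m)]
    exact hc
  have := pvPrefix_get _ _ hq m c hqm
  have := pvIndentWidth_stop (pvCpFold first rest) c (by rw [← hm]; exact this)
  rw [this] at hw
  exact Bool.false_ne_true hw

theorem pvInnerA_all (nc : Char) (k : Nat) (rest : List (List Char))
    (h : ∀ l ∈ rest, l ≠ [] → PySem.List.pyGet? l (k : Int) = some nc) :
    pvInnerA nc k rest (some nc) = some nc := by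
  induction rest with
  | nil => rfl
  | cons x tl ih =>
    simp only [pvInnerA]
    by_cases hx : x.isEmpty
    · simp only [hx, if_true]
      exact ih (fun l hl => h l (List.mem_cons_of_mem _ hl))
    · simp only [hx, if_false, Bool.false_eq_true]
      rw [h x List.mem_cons_self (by simpa using hx)]
      simp only [if_pos]
      exact ih (fun l hl => h l (List.mem_cons_of_mem _ hl))

theorem pvInnerA_all_some (nc : Char) (k : Nat) :
    ∀ (rest : List (List Char)) (ch : Option Char),
      (∀ l ∈ rest, l ≠ [] → PySem.List.pyGet? l (k : Int) = some nc) →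
      (∃ l ∈ rest, l ≠ []) → pvInnerA nc k rest ch = some nc := by
  intro rest
  induction rest with
  | nil =>
    intro ch h hex
    obtain ⟨l, hl, _⟩ := hex; simp at hl
  | cons x tl ih =>
    intro ch h hex
    simp only [pvInnerA]
    by_cases hx : x.isEmpty
    · simp only [hx, if_true]
      have hx' : x = [] := by simpa using hx
      obtain ⟨l, hl, hlne⟩ := hex
      rcases List.mem_cons.mp hl with rfl | hl'
      · exact absurd hx' hlne
      · exact ih ch (fun l hl => h l (List.mem_cons_of_mem _ hl)) ⟨l, hl', hlne⟩
    · simp only [hx, if_false, Bool.false_eq_true]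
      rw [h x List.mem_cons_self (by simpa using hx)]
      simp only [if_pos]
      exact pvInnerA_all nc k tl (fun l hl => h l (List.mem_cons_of_mem _ hl))

theorem pvInnerA_fail (nc : Char) (k : Nat) (rest : List (List Char))
    (hex : ∃ l ∈ rest, l ≠ [] ∧ PySem.List.pyGet? l (k : Int) ≠ some nc) :
    ∀ ch, pvInnerA nc k rest ch ≠ some nc := by
  induction rest with
  | nil => obtain ⟨l, hl, _⟩ := hex; simp at hl
  | cons x tl ih =>
    intro ch
    obtain ⟨l, hl, hlne, hfail⟩ := hex
    simp only [pvInnerA]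
    rcases List.mem_cons.mp hl with rfl | hl'
    · have hx : l.isEmpty = false := by simpa using hlne
      simp only [hx, if_false, Bool.false_eq_true]
      cases hg : PySem.List.pyGet? l (k : Int) with
      | none => simp
      | some c =>
        have hcnc : c ≠ nc := by rintro rfl; exact hfail hg
        simp [hcnc]
    · by_cases hx : x.isEmpty
      · simp only [hx, if_true]
        exact ih ⟨l, hl', hlne, hfail⟩ ch
      · simp only [hx, if_false, Bool.false_eq_true]
        cases hg : PySem.List.pyGet? x (k : Int) with
        | none => simp
        | some c =>
          by_cases hc : c = nc
          · simp only [hc]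
            exact ih ⟨l, hl', hlne, hfail⟩ (some nc)
          · simp [hc]

theorem pvOuterA_eq (first : List Char) (rest : List (List Char))
    (hex : ∃ l ∈ rest, l ≠ []) :
    ∀ fuel k, k ≤ pvIndentWidth (pvCpFold first rest) →
      first.length + 1 - k ≤ fuel →
      pvOuterA first rest fuel k = pvIndentWidth (pvCpFold first rest) := by
  have hm_le : pvIndentWidth (pvCpFold first rest) ≤ first.length :=
    (pvIndentWidth_le _).trans (pvCpFold_prefix_acc rest first).length_le
  intro fuel
  induction fuel with
  | zero => intro k hk hfuel; omega
  | succ fuel ih =>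
    intro k hk hfuel
    simp only [pvOuterA, PySem.List.pyGet?_natCast]
    by_cases hkm : k < pvIndentWidth (pvCpFold first rest)
    · obtain ⟨c, hc, hw, hall⟩ := pvColOk_of_lt first rest k hkm
      have hinner : pvInnerA c k rest none = some c := by
        refine pvInnerA_all_some c k rest none (fun l hl hne => ?_) hex
        rw [PySem.List.pyGet?_natCast]; exact hall l hl hne
      simp only [hc, hw, if_true, hinner]
      exact ih (k+1) (by omega) (by omega)
    · have hkm' : k = pvIndentWidth (pvCpFold first rest) := by omega
      cases hfc : first[k]? with
      | none => exact hkm'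
      | some nc =>
        by_cases hw : pvIsWs nc
        · have hfail : ∃ l ∈ rest, l ≠ [] ∧ PySem.List.pyGet? l (k : Int) ≠ some nc := by
            by_contra hno
            push_neg at hno
            refine pvColOk_not first rest ?_
            rw [← hkm']
            exact ⟨nc, hfc, hw, fun l hl hne => by
              rw [← PySem.List.pyGet?_natCast]; exact hno l hl hne⟩
          have hnres := pvInnerA_fail nc k rest hfail none
          simp only [hw, if_true]
          cases hi : pvInnerA nc k rest none with
          | none => exact hkm'
          | some c =>
            have hcnc : c ≠ nc := fun h => hnres (h ▸ hi)
            simp only [if_neg hcnc]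
            exact hkm'
        · dsimp only
          rw [if_neg hw]
          exact hkm'

theorem pvBranch (first : List Char) (rest : List (List Char))
    (hf : first ≠ []) (hex : ∃ l ∈ rest, l ≠ []) :
    (let k := pvOuterA first rest (first.length + 1) 0;
     if k = 0 then first :: rest
     else (first :: rest).map (fun l => if l.isEmpty then l else PySem.List.slice l (some (k : Int)) none))
    = (first :: rest).map
        (fun l => PySem.List.slice l (some ((pvIndentWidth ((pvFoldPrefix (first :: rest)).getD [])) : Int)) none) := by
  have hfold : pvFoldPrefix (first :: rest) = some (pvCpFold first rest) := by
    simp only [pvFoldPrefix, List.foldl_cons]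
    have hf' : first.isEmpty = false := by simpa using hf
    rw [hf']
    exact pvFoldPrefix_some rest first
  rw [hfold]
  simp only [Option.getD_some]
  have hk : pvOuterA first rest (first.length + 1) 0 = pvIndentWidth (pvCpFold first rest) :=
    pvOuterA_eq first rest hex (first.length + 1) 0 (Nat.zero_le _) (by omega)
  rw [hk]
  have hslice : ∀ l : List Char,
      PySem.List.slice l (some ((pvIndentWidth (pvCpFold first rest)) : Int)) none
        = l.drop (pvIndentWidth (pvCpFold first rest)) :=
    fun l => PySem.List.slice_from_natCast l _
  by_cases hm0 : pvIndentWidth (pvCpFold first rest) = 0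
  · simp [hm0]
  · simp only [hm0, if_false]
    refine List.map_congr_left (fun l _ => ?_)
    by_cases hl : l.isEmpty
    · have : l = [] := by simpa using hl
      subst this
      simp [hslice]
    · simp [hl, hslice]

-- ===== VERDICT (by name: the statement is the Claim_ definition above) =====
theorem normalize_description_spec : Claim_equal_normalize_description := by
  intro text _
  unfold Spec_normalize_description normalize_description normalize_description_alt
  simp only []
  set lines0 := (PySem.Chars.splitlines text.toList).map PySem.Chars.rstrip with hl0
  rw [pvTrimEndA_eq]
  cases hE : pvTrimEndB lines0.reverse with
  | nil => simp
  | cons l tl =>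
    have hlne : l ≠ [] := pvTrimEndB_head _ _ _ hE
    simp only [List.isEmpty_cons, Bool.false_eq_true, if_false, List.isEmpty_reverse]
    rw [pvTrimStart_eq]
    have hgl : (pvTrimStartB (l :: tl).reverse).getLast? = some l :=
      pvTrimStartB_getLast? _ _ (by simp) hlne
    cases hL : pvTrimStartB (l :: tl).reverse with
    | nil => rw [hL] at hgl; simp at hgl
    | cons first rest =>
      rw [hL] at hgl
      cases rest with
      | nil =>
        simp at hgl
        subst hgl
        simp
      | cons y ytl =>
        have hf : first ≠ [] := pvTrimStartB_head _ _ _ hL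
        have hex : ∃ a ∈ y :: ytl, a ≠ [] := by
          rw [List.getLast?_cons_cons] at hgl
          exact ⟨l, List.mem_of_getLast? hgl, hlne⟩
        have hlen : (first :: y :: ytl).length ≠ 1 := by simp
        simp only [hlen, if_false]
        have := pvBranch first (y :: ytl) hf hex
        simp only [this]
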